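-- pv_equiv track=rewrite | github.com/DVLab-NTU/qsyn | benchmark/qsyn_testing_code/comparison.py | get_first_and_last_idx
-- ===== SOURCE A (Python) =====
-- def get_first_and_last_idx(arr):
-- 	first_idx = arr.index("Listed by gate ID\n")
-- 	idxs = [idx for idx, val in enumerate(arr) if "Gate" in val]
-- 	last_idx = 0
-- 	if(len(idxs) == 0):
-- 		last_idx = first_idx
-- 	else:
-- 		last_idx = idxs[-1]
-- 	return first_idx, last_idx
-- ===== SOURCE B (Python) =====
-- def get_first_and_last_idx(arr):
-- 	first_idx = arr.index("Listed by gate ID\n")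
-- 	last_idx = first_idx
-- 	for idx in range(len(arr) - 1, -1, -1):
-- 		if "Gate" in arr[idx]:
-- 			last_idx = idx
-- 			break
-- 	return first_idx, last_idx
-- ===== Notes on version B (the rewrite author's own statement) =====
-- stated objective: alternative
-- what changed: Replaces building the full list of all 'Gate'-containing indices and taking its last element by an early-exit backward scan that stops at the first match from the end and keeps no list, falling back to first_idx when nothing matches.
import Mathlib
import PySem

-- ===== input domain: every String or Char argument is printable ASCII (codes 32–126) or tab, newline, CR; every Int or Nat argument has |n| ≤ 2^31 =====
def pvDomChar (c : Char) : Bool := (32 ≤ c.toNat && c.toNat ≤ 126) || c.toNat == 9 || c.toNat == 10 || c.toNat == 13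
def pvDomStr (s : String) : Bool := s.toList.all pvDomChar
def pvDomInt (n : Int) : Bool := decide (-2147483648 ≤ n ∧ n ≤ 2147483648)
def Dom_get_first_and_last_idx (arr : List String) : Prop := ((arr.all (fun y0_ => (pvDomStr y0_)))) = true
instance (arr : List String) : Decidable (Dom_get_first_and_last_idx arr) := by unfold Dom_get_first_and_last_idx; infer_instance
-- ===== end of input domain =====

-- B replaces the comprehension of all 'Gate' indices (take its last) by an early-exit backward scan with no list; alternative decomposition, same asymptotic cost.

-- ===== PORT A =====
def get_first_and_last_idx (arr : List String) : Int × Int :=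
  let first_idx : Int := ((PySem.List.index? arr "Listed by gate ID\n").getD 0 : Nat)
  let idxs : List Int :=
    ((PySem.List.enumerate arr).filter (fun p => PySem.Str.isIn "Gate" p.2)).map (·.1)
  let last_idx : Int := if idxs.length = 0 then first_idx else (PySem.List.pyGet? idxs (-1)).getD 0
  (first_idx, last_idx)

-- ===== PORT B =====
-- backward scan: first (index, value) pair, from the end, whose value contains "Gate"
def bScanRev (l : List (Int × String)) : Option Int :=
  match l with
  | [] => none
  | (i, s) :: rest => if PySem.Str.isIn "Gate" s then some i else bScanRev rest

def get_first_and_last_idx_alt (arr : List String) : Int × Int :=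
  let first_idx : Int := ((PySem.List.index? arr "Listed by gate ID\n").getD 0 : Nat)
  let last_idx : Int := (bScanRev (PySem.List.enumerate arr).reverse).getD first_idx
  (first_idx, last_idx)

-- ===== PRECONDITION & SPEC =====
-- Pre_ excludes exactly the inputs where Python's arr.index raises ValueError (both A and B raise there).
def Pre_get_first_and_last_idx (arr : List String) : Prop := "Listed by gate ID\n" ∈ arr
instance (arr : List String) : Decidable (Pre_get_first_and_last_idx arr) := by unfold Pre_get_first_and_last_idx; infer_instance
def pvWitness_get_first_and_last_idx : List String := ["Gate foo", "Listed by gate ID\n", "bar"]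
def Spec_get_first_and_last_idx (arr : List String) (out : Int × Int) : Prop := out = get_first_and_last_idx_alt arr
instance (arr : List String) (out : Int × Int) : Decidable (Spec_get_first_and_last_idx arr out) := by unfold Spec_get_first_and_last_idx; infer_instance

-- ===== CLAIM (what is proved, stated in full; the proofs are below) =====
def Claim_equal_get_first_and_last_idx : Prop := ∀ (arr : List String), Dom_get_first_and_last_idx arr → Pre_get_first_and_last_idx arr → Spec_get_first_and_last_idx arr (get_first_and_last_idx arr)

-- ===== LEMMAS AND PROOFS =====

-- the backward scan of l computes the last match of the forward filtered list l.reverse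
theorem bScanRev_eq_getLast? (l : List (Int × String)) :
    bScanRev l = (((l.reverse.filter (fun p => PySem.Str.isIn "Gate" p.2)).map (·.1)).getLast?) := by
  induction l with
  | nil => simp [bScanRev]
  | cons x t ih =>
    by_cases h : PySem.Str.isIn "Gate" x.2
    · simp only [bScanRev, h, List.reverse_cons, List.filter_append, List.filter_cons,
        List.filter_nil, List.map_append, List.map_cons, List.map_nil, ite_true,
        List.getLast?_concat]
    · simp only [bScanRev, h, List.reverse_cons, List.filter_append, List.filter_cons,
        List.map_append, ih]
      simp

-- ===== VERDICT (by name: the statement is the Claim_ definition above) =====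
theorem get_first_and_last_idx_spec : Claim_equal_get_first_and_last_idx := by
  intro arr _ _
  unfold Spec_get_first_and_last_idx get_first_and_last_idx get_first_and_last_idx_alt
  simp only []
  have h := bScanRev_eq_getLast? (PySem.List.enumerate arr).reverse
  rw [List.reverse_reverse] at h
  rw [h]
  set idxs := ((PySem.List.enumerate arr).filter (fun p => PySem.Str.isIn "Gate" p.2)).map (·.1) with hidxs
  by_cases hn : idxs.length = 0
  · have : idxs = [] := List.eq_nil_of_length_eq_zero hn
    simp [this]
  · have hne : idxs ≠ [] := by intro h0; exact hn (by simp [h0])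
    obtain ⟨v, hv⟩ := Option.isSome_iff_exists.mp (List.getLast?_isSome.mpr hne)
    rw [PySem.List.pyGet?_neg_one, hv]
    simp [hn]
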